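-- pv_equiv track=rewrite | github.com/ruiz-salvat/morfeo | Archive/Simulator/Patterns/BoltPattern.py | transform
-- ===== SOURCE A (Python) =====
-- def transform(array):
--     binary_array = []
--     for i in range(1, len(array)):
--         if array[i - 1] < array[i]:
--             binary_array.append(True)  # True -> price increased
--         elif array[i - 1] > array[i]:
--             binary_array.append(False)  # False -> price decreased
--         else:
--             if i > 1:
--                 binary_array.append(binary_array[len(binary_array) - 1])
--             else:
--                 binary_array.append(True)  # arbitrary
--     return binary_array
-- ===== SOURCE B (Python) =====
-- def transform(array):
--     # Run-length encode: peel maximal blocks of equal values from the front.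
--     runs = []
--     i, n = 0, len(array)
--     while i < n:
--         j = i + 1
--         while j < n and array[j] == array[i]:
--             j += 1
--         runs.append((array[i], j - i))
--         i = j
--     # Emit: one direction per run boundary; tie positions inside a run repeat
--     # the carried direction (True before the first boundary).
--     out = []
--     prev = True
--     for k in range(len(runs)):
--         v, c = runs[k]
--         out += [prev] * (c - 1)
--         if k + 1 < len(runs):
--             prev = v < runs[k + 1][0]
--             out.append(prev)
--     return out
-- ===== Notes on version B (the rewrite author's own statement) =====
-- stated objective: alternative
-- what changed: Replaces A's stateful per-pair scan (carrying the last appended flag across ties) with a run-length-encoding algorithm: B compresses the array into (value, run length) pairs, then emits one direction per run boundary, replicated over tie positions by the run lengths.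
import Mathlib
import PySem

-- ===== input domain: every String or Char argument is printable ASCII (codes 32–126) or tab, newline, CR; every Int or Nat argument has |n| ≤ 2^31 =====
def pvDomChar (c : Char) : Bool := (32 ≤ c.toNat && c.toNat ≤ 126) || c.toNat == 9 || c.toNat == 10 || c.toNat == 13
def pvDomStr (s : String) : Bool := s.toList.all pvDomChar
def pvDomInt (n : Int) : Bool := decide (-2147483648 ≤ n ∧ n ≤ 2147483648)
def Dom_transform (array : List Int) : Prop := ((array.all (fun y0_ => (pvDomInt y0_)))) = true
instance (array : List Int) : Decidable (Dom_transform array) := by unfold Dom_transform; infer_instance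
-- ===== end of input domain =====

-- B is an alternative same-cost algorithm: run-length encode the array, then emit one
-- direction per run boundary, replicated over tie positions by the run lengths.

-- ===== PORT A =====
-- indices i and i-1 are always in range, so pyGetD's default 0 is never used
def transform (array : List Int) : List Bool :=
  (PySem.List.pyRange 1 (array.length : Int) 1).foldl
    (fun binary_array i =>
      if PySem.List.pyGetD array (i - 1) 0 < PySem.List.pyGetD array i 0 then
        binary_array ++ [true]
      else if PySem.List.pyGetD array (i - 1) 0 > PySem.List.pyGetD array i 0 then
        binary_array ++ [false]
      else if i > 1 then
        -- binary_array is nonempty here, so the default true is never used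
        binary_array ++ [PySem.List.pyGetD binary_array ((binary_array.length : Int) - 1) true]
      else
        binary_array ++ [true]) []

-- ===== PORT B =====
-- inner while loop of the encoder: length of the leading block of values equal to x
def pvLead (x : Int) : List Int → Nat
  | [] => 0
  | y :: t => if y == x then 1 + pvLead x t else 0

-- the suffix after that leading block (i = j advance of the outer while loop)
def pvDrop (x : Int) : List Int → List Int
  | [] => []
  | y :: t => if y == x then pvDrop x t else y :: t

lemma pvDrop_length_le (x : Int) (t : List Int) : (pvDrop x t).length ≤ t.length := by
  induction t with
  | nil => simp [pvDrop]
  | cons y r ih =>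
    simp only [pvDrop]
    split
    · exact le_trans ih (by simp)
    · simp

-- outer while loop: run-length encoding, peeling maximal blocks from the front
def pvRuns : List Int → List (Int × Nat)
  | [] => []
  | x :: t => (x, 1 + pvLead x t) :: pvRuns (pvDrop x t)
termination_by xs => xs.length
decreasing_by
  have := pvDrop_length_le x t
  simp only [List.length_cons]
  omega

-- emit loop: state prev carried across iterations, lookahead at the next run's value
def pvEmit : List (Int × Nat) → Bool → List Bool
  | [], _ => []
  | (v, c) :: rest, prev =>
    match rest with
    | [] => List.replicate (c - 1) prev
    | (w, _) :: _ =>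
        List.replicate (c - 1) prev ++ [decide (v < w)] ++ pvEmit rest (decide (v < w))

def transform_alt (array : List Int) : List Bool :=
  pvEmit (pvRuns array) true

-- ===== PRECONDITION & SPEC =====
def Spec_transform (array : List Int) (out : List Bool) : Prop := out = transform_alt array
instance (array : List Int) (out : List Bool) : Decidable (Spec_transform array out) := by unfold Spec_transform; infer_instance

-- ===== CLAIM (what is proved, stated in full; the proofs are below) =====
def Claim_equal_transform : Prop := ∀ (array : List Int), Dom_transform array → Spec_transform array (transform array)

-- ===== LEMMAS AND PROOFS =====

-- reference recursion both ports are reduced to: one output per adjacent pair, carrying prev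
def pvFill : List Int → Bool → List Bool
  | [], _ => []
  | [_], _ => []
  | x :: y :: rest, prev =>
      (if x < y then true else if y < x then false else prev) ::
        pvFill (y :: rest) (if x < y then true else if y < x then false else prev)

lemma pvFill_short (xs : List Int) (prev : Bool) (h : xs.length ≤ 1) : pvFill xs prev = [] := by
  match xs with
  | [] => rfl
  | [_] => rfl
  | _ :: _ :: _ => simp at h

lemma pvFill_length (xs : List Int) (prev : Bool) : (pvFill xs prev).length = xs.length - 1 := by
  induction xs generalizing prev with
  | nil => rfl
  | cons x t ih =>
    cases t with
    | nil => rfl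
    | cons y r => simp [pvFill, ih]

lemma getLastD_eq_getD {α : Type} (l : List α) (d : α) (_h : l ≠ []) :
    l.getLastD d = l.getD (l.length - 1) d := by
  rw [List.getLastD_eq_getLast?, List.getLast?_eq_getElem?, List.getD_eq_getElem?_getD]

lemma getLastD_take (xs : List Int) (k : Nat) (h1 : 1 ≤ k) (h2 : k ≤ xs.length) :
    (xs.take k).getLastD 0 = xs[k - 1]?.getD 0 := by
  have hne : xs.take k ≠ [] := by
    have hl : (xs.take k).length = k := by simp; omega
    intro h
    rw [h] at hl
    simp at hl
    omega
  rw [getLastD_eq_getD _ _ hne, List.getD_eq_getElem?_getD]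
  rw [List.getElem?_take]
  simp only [List.length_take, Nat.min_eq_left h2]
  rw [if_pos (by omega)]

lemma pvFill_snoc (xs : List Int) (prev : Bool) (z : Int) (h : xs ≠ []) :
    pvFill (xs ++ [z]) prev =
      pvFill xs prev ++
        [if xs.getLastD 0 < z then true
         else if z < xs.getLastD 0 then false
         else (pvFill xs prev).getLastD prev] := by
  induction xs generalizing prev with
  | nil => exact absurd rfl h
  | cons x t ih =>
    cases t with
    | nil => simp [pvFill]
    | cons y r =>
      have hstep : pvFill ((x :: y :: r) ++ [z]) prev
          = (if x < y then true else if y < x then false else prev)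
            :: pvFill ((y :: r) ++ [z]) (if x < y then true else if y < x then false else prev) := rfl
      have hfill : pvFill (x :: y :: r) prev
          = (if x < y then true else if y < x then false else prev)
            :: pvFill (y :: r) (if x < y then true else if y < x then false else prev) := rfl
      rw [hstep, ih _ (by simp), hfill]
      simp only [List.cons_append, List.getLastD_cons]

lemma A_fold (xs : List Int) (k : Nat) (hk : k ≤ xs.length) :
    (PySem.List.pyRange 1 (k : Int) 1).foldl
      (fun binary_array i =>
        if PySem.List.pyGetD xs (i - 1) 0 < PySem.List.pyGetD xs i 0 then
          binary_array ++ [true]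
        else if PySem.List.pyGetD xs (i - 1) 0 > PySem.List.pyGetD xs i 0 then
          binary_array ++ [false]
        else if i > 1 then
          binary_array ++ [PySem.List.pyGetD binary_array ((binary_array.length : Int) - 1) true]
        else
          binary_array ++ [true]) []
      = pvFill (xs.take k) true := by
  induction k with
  | zero =>
    rw [PySem.List.pyRange_one_eq_nil (by norm_num)]
    rfl
  | succ k ih =>
    by_cases hk0 : k = 0
    · subst hk0
      rw [show ((1 : Nat) : Int) = 1 by norm_num, PySem.List.pyRange_one_eq_nil (by norm_num)]
      rw [pvFill_short _ _ (by simp)]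
      rfl
    · have hk1 : 1 ≤ k := by omega
      have hklen : k < xs.length := by omega
      have hcast : ((k + 1 : Nat) : Int) = (k : Int) + 1 := by push_cast; ring
      rw [hcast, PySem.List.pyRange_one_succ_right (by exact_mod_cast hk1),
        List.foldl_append, List.foldl_cons, List.foldl_nil, ih (by omega)]
      have ht : xs.take (k + 1) = xs.take k ++ [xs[k]?.getD 0] := by
        rw [List.take_add_one, List.getElem?_eq_getElem hklen]
        rfl
      have htake_ne : xs.take k ≠ [] := by
        have hl : (xs.take k).length = k := by simp; omega
        intro h; rw [h] at hl; simp at hl; omega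
      rw [ht, pvFill_snoc _ _ _ htake_ne, getLastD_take xs k hk1 (by omega)]
      have hidx1 : ((k : Int) - 1) = ((k - 1 : Nat) : Int) := by omega
      simp only [hidx1, PySem.List.pyGetD_natCast]
      by_cases h1 : xs[k - 1]?.getD 0 < xs[k]?.getD 0
      · simp [h1]
      · by_cases h2 : xs[k]?.getD 0 < xs[k - 1]?.getD 0
        · simp [h1, h2]
        · by_cases hk2 : 2 ≤ k
          · have hlt : (1 : Int) < (k : Int) := by exact_mod_cast (by omega : 1 < k)
            simp only [if_neg h1, gt_iff_lt, if_neg h2, if_pos hlt]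
            have hblen : (pvFill (xs.take k) true).length = k - 1 := by
              rw [pvFill_length]; simp; omega
            have hbne : pvFill (xs.take k) true ≠ [] := by
              intro h; rw [h] at hblen; simp at hblen; omega
            simp [h1, h2]
            rw [List.getLast?_eq_getElem?, hblen,
              show ((k - 1 : Nat) : Int) - 1 = ((k - 1 - 1 : Nat) : Int) by omega,
              PySem.List.pyGetD_natCast, List.getD_eq_getElem?_getD]
          · have hk1' : k = 1 := by omega
            subst hk1'
            simp only [show (1 - 1 : Nat) = 0 from rfl] at h1 h2
            simp [h1, h2, pvFill_short _ _ (by simp : (xs.take 1).length ≤ 1)]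

-- pvFill over a maximal leading run: ties replicate prev, then the boundary direction
lemma pvFill_run (t : List Int) : ∀ (x : Int) (prev : Bool),
    pvFill (x :: t) prev =
      List.replicate (pvLead x t) prev ++
        (match pvDrop x t with
         | [] => []
         | y :: r => decide (x < y) :: pvFill (y :: r) (decide (x < y))) := by
  induction t with
  | nil => intro x prev; simp [pvFill, pvLead, pvDrop]
  | cons z s ih =>
    intro x prev
    by_cases hz : z = x
    · subst hz
      have hfill : pvFill (z :: z :: s) prev = prev :: pvFill (z :: s) prev := by
        simp [pvFill]
      rw [hfill, ih z prev]
      simp only [pvLead, pvDrop, BEq.rfl, if_true]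
      rw [Nat.add_comm 1 (pvLead z s), List.replicate_succ]
      simp
    · have hd : (if x < z then true else if z < x then false else prev) = decide (x < z) := by
        rcases lt_trichotomy x z with h | h | h
        · simp [h]
        · exact absurd h.symm hz
        · simp [h, not_lt.mpr h.le]
      have hfill : pvFill (x :: z :: s) prev
          = (if x < z then true else if z < x then false else prev)
            :: pvFill (z :: s) (if x < z then true else if z < x then false else prev) := rfl
      rw [hfill, hd]
      simp [pvLead, pvDrop, hz, beq_iff_eq]

-- B equals the reference recursion (strong induction on the length)
lemma emit_runs_eq_fill : ∀ (n : Nat) (xs : List Int), xs.length ≤ n → ∀ (prev : Bool),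
    pvEmit (pvRuns xs) prev = pvFill xs prev := by
  intro n
  induction n with
  | zero =>
    intro xs h prev
    have hx : xs = [] := List.eq_nil_of_length_eq_zero (by omega)
    subst hx
    simp [pvRuns, pvEmit, pvFill]
  | succ n ih =>
    intro xs h prev
    cases xs with
    | nil => simp [pvRuns, pvEmit, pvFill]
    | cons x t =>
      rw [pvFill_run t x prev, pvRuns]
      cases hdrop : pvDrop x t with
      | nil => simp [pvRuns, pvEmit]
      | cons y r =>
        have hlen : (y :: r).length ≤ n := by
          have h1 := pvDrop_length_le x t
          rw [hdrop] at h1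
          simp only [List.length_cons] at h h1 ⊢
          omega
        have hruns : pvRuns (y :: r) = (y, 1 + pvLead y r) :: pvRuns (pvDrop y r) := by
          rw [pvRuns]
        rw [hruns]
        show List.replicate (1 + pvLead x t - 1) prev ++ [decide (x < y)]
              ++ pvEmit ((y, 1 + pvLead y r) :: pvRuns (pvDrop y r)) (decide (x < y)) = _
        rw [← hruns, ih (y :: r) hlen]
        simp

-- ===== VERDICT (by name: the statement is the Claim_ definition above) =====
theorem transform_spec : Claim_equal_transform := by
  intro array _
  unfold Spec_transform transform transform_alt
  rw [emit_runs_eq_fill array.length array (le_refl _)]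
  have := A_fold array array.length (le_refl _)
  simpa [List.take_length] using this
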